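-- pv_equiv track=rewrite | github.com/pypi-data/pypi-mirror-74 | packages/xlist/xlist-0.0.4.tar.gz/xlist-0.0.4/xlist/elist.py | find_fst_valuepair_fstltsnd_via_reversing
-- ===== SOURCE A (Python) =====
-- def find_fst_valuepair_fstltsnd_via_reversing(arr):
--     lngth = len(arr)
--     for snd in range(lngth-1,0,-1):
--         fst = snd - 1
--         if(arr[fst]<arr[snd]):
--             return((arr[fst],arr[snd]))
--         else:
--             pass
--     return(None)
-- ===== SOURCE B (Python) =====
-- def find_fst_valuepair_fstltsnd_via_reversing(arr):
--     result = None
--     for i in range(len(arr) - 1):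
--         if arr[i] < arr[i + 1]:
--             result = (arr[i], arr[i + 1])
--     return result
-- ===== Notes on version B (the rewrite author's own statement) =====
-- stated objective: alternative
-- what changed: Replaces the backward scan with early exit by a single forward pass that keeps overwriting an accumulator with the latest ascending adjacent pair, so the last (highest-index) match survives with no early return.
import Mathlib
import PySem

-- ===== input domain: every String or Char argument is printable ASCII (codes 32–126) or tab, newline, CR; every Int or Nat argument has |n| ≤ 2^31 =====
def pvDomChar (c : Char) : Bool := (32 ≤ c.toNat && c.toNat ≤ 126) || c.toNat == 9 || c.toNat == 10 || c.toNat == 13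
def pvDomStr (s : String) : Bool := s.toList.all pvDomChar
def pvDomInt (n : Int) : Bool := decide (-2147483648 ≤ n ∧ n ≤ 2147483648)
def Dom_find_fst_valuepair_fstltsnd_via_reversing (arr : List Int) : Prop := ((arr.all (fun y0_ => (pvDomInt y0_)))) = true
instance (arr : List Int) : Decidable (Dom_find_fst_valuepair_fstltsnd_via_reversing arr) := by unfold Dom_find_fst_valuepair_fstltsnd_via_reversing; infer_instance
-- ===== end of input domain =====

-- B replaces A's backward early-exit scan by a forward full pass keeping the last ascending adjacent pair in an accumulator (objective: alternative decomposition, same cost).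

-- ===== PORT A =====
-- early-exit loop over the countdown range(len(arr)-1, 0, -1)
def pvLoopA (arr : List Int) : List Int → Option (Int × Int)
  | [] => none
  | snd :: rest =>
      if PySem.List.pyGetD arr (snd - 1) 0 < PySem.List.pyGetD arr snd 0 then
        some (PySem.List.pyGetD arr (snd - 1) 0, PySem.List.pyGetD arr snd 0)
      else pvLoopA arr rest

def find_fst_valuepair_fstltsnd_via_reversing (arr : List Int) : Option (Int × Int) :=
  pvLoopA arr (PySem.List.pyRange ((PySem.List.len arr) - 1) 0 (-1))

-- ===== PORT B =====
def find_fst_valuepair_fstltsnd_via_reversing_alt (arr : List Int) : Option (Int × Int) :=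
  (PySem.List.pyRange 0 ((PySem.List.len arr) - 1) 1).foldl
    (fun result i =>
      if PySem.List.pyGetD arr i 0 < PySem.List.pyGetD arr (i + 1) 0 then
        some (PySem.List.pyGetD arr i 0, PySem.List.pyGetD arr (i + 1) 0)
      else result)
    none

-- ===== PRECONDITION & SPEC =====
def Spec_find_fst_valuepair_fstltsnd_via_reversing (arr : List Int) (out : Option (Int × Int)) : Prop := out = find_fst_valuepair_fstltsnd_via_reversing_alt arr
instance (arr : List Int) (out : Option (Int × Int)) : Decidable (Spec_find_fst_valuepair_fstltsnd_via_reversing arr out) := by unfold Spec_find_fst_valuepair_fstltsnd_via_reversing; infer_instance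

-- ===== CLAIM (what is proved, stated in full; the proofs are below) =====
def Claim_equal_find_fst_valuepair_fstltsnd_via_reversing : Prop := ∀ (arr : List Int), Dom_find_fst_valuepair_fstltsnd_via_reversing arr → Spec_find_fst_valuepair_fstltsnd_via_reversing arr (find_fst_valuepair_fstltsnd_via_reversing arr)

-- ===== LEMMAS AND PROOFS =====

-- first match over the reverse of the shifted index list = keep-last fold over the list
theorem pvLoopA_reverse_eq_foldl (arr : List Int) (R : List Int) :
    pvLoopA arr ((R.map (fun i => i + 1)).reverse) =
      R.foldl
        (fun result i =>
          if PySem.List.pyGetD arr i 0 < PySem.List.pyGetD arr (i + 1) 0 then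
            some (PySem.List.pyGetD arr i 0, PySem.List.pyGetD arr (i + 1) 0)
          else result)
        none := by
  induction R using List.reverseRecOn with
  | nil => rfl
  | append_singleton R i ih =>
      simp only [List.map_append, List.reverse_append, List.map_cons, List.map_nil,
        List.reverse_cons, List.reverse_nil, List.nil_append, List.cons_append,
        List.foldl_append, List.foldl_cons, List.foldl_nil, pvLoopA]
      have h1 : i + 1 - 1 = i := by ring
      rw [h1, ih]

theorem pvRange_shift (n : Int) :
    PySem.List.pyRange (n - 1) 0 (-1) = ((PySem.List.pyRange 0 (n - 1) 1).map (fun i => i + 1)).reverse := by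
  rw [PySem.List.pyRange_neg_one_eq_reverse]
  congr 1
  rw [PySem.List.pyRange_one, PySem.List.pyRange_one, List.map_map]
  have h : (n - 1 + 1 - (0 + 1)).toNat = (n - 1 - 0).toNat := by norm_num
  rw [h]
  apply List.map_congr_left
  intro k _
  simp [Function.comp]
  ring

-- ===== VERDICT (by name: the statement is the Claim_ definition above) =====
theorem find_fst_valuepair_fstltsnd_via_reversing_spec : Claim_equal_find_fst_valuepair_fstltsnd_via_reversing := by
  intro arr _
  unfold Spec_find_fst_valuepair_fstltsnd_via_reversing
  unfold find_fst_valuepair_fstltsnd_via_reversing find_fst_valuepair_fstltsnd_via_reversing_alt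
  rw [pvRange_shift, pvLoopA_reverse_eq_foldl]
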